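-- pv_equiv track=rewrite | github.com/gautamop01/BCH-ENCODER-CS425 | WEB_PAGE/home/views.py | find_conjugates
-- ===== SOURCE A (Python) =====
-- def gf_multiply(a, b, irreducible_poly):
--     result = 0
--     while b:
--         if b & 1:
--             result ^= a
--         a <<= 1
--         if a & (1 << len(bin(irreducible_poly)) - 3):
--             a ^= irreducible_poly
--         b >>= 1
--     return result
--
-- def find_conjugates(alpha, irreducible_poly):
--     conjugates = []
--     conjugate = 1
--     field_size = 1 << len(bin(irreducible_poly)) - 3
--     for _ in range(field_size):
--         conjugate = gf_multiply(alpha, conjugate, irreducible_poly)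
--         conjugates.append(conjugate)
--     return conjugates
-- ===== SOURCE B (Python) =====
-- def _gf_mult(a, b, poly):
--     # MSB-first Horner field multiplication: shift-and-reduce the accumulator,
--     # XOR in a on each set bit of b.
--     m = max(poly.bit_length() - 1, 0)
--     r = 0
--     for i in reversed(range(b.bit_length())):
--         r <<= 1
--         if r & (1 << m):
--             r ^= poly
--         if (b >> i) & 1:
--             r ^= a
--     return r
--
-- def find_conjugates(alpha, irreducible_poly):
--     conjugates = []
--     conjugate = 1
--     for _ in range(1 << max(irreducible_poly.bit_length() - 1, 0)):
--         conjugate = _gf_mult(alpha, conjugate, irreducible_poly)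
--         conjugates.append(conjugate)
--     return conjugates
-- ===== Notes on version B (the rewrite author's own statement) =====
-- stated objective: alternative
-- what changed: gf_multiply's LSB-first loop that shifts-and-reduces the multiplicand alpha while scanning b's low bits is replaced by a classic MSB-first Horner multiplication that shifts-and-reduces the accumulator and XORs alpha in on each set bit of b; the outer power-sequence loop is kept; Pre_ excludes negative arguments, on which A's while-b loop diverges or returns sign-dependent artefacts of Python's bin().
-- outside the precondition, e.g. on find_conjugates(2, -1): A returns [2, 4], B returns [2]; on find_conjugates(-1, 2): A does not finish within the time limit, B returns [-1, -1]
import Mathlib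
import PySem

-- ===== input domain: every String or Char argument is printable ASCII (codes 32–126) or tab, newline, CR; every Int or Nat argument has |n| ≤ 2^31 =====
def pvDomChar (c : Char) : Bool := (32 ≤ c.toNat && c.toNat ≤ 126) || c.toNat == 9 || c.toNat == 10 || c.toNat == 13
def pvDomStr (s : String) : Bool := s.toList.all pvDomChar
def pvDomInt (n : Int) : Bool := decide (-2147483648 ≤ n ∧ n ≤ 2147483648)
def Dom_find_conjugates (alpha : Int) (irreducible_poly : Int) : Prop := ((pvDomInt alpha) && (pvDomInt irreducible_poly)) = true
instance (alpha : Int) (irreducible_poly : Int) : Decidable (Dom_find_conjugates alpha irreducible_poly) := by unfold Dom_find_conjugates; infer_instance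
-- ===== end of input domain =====

-- B replaces gf_multiply's LSB-first shift-and-reduce of the multiplicand by a classic
-- MSB-first Horner multiplication that shifts-and-reduces the accumulator; same cost.

-- ===== PORT A =====

-- len(bin(p)) - 3: bin(0) = "0b0" has length 3; otherwise 2 + digits, plus 1 for '-' when p < 0
def pyBinLenSub3 (p : Int) : Nat :=
  if p = 0 then 0
  else if 0 < p then PySem.Int.bitLength p - 1
  else PySem.Int.bitLength p

-- the `while b:` loop of gf_multiply; the fuel only totalises the loop — for b ≥ 0 the loop
-- runs at most bitLength b times, so fuel = bitLength b + 1 never runs out where Python returns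
-- (for b < 0 Python's loop never terminates, and those inputs are outside Pre_)
def gf_multiply_loop : Nat → Int → Int → Int → Int → Int
  | 0, _, _, _, result => result
  | fuel + 1, a, b, p, result =>
    if b = 0 then result
    else
      let result1 := if PySem.Int.band b 1 ≠ 0 then PySem.Int.bxor result a else result
      let a1 := a <<< (1 : Nat)
      let a2 := if PySem.Int.band a1 ((1 : Int) <<< pyBinLenSub3 p) ≠ 0 then PySem.Int.bxor a1 p else a1
      gf_multiply_loop fuel a2 (b >>> (1 : Nat)) p result1

def gf_multiply (a b irreducible_poly : Int) : Int :=
  gf_multiply_loop (PySem.Int.bitLength b + 1) a b irreducible_poly 0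

def find_conjugates (alpha : Int) (irreducible_poly : Int) : List Int :=
  -- field_size = 1 << (len(bin(p)) - 3); the loop runs field_size (≥ 1) times
  ((List.range (1 <<< pyBinLenSub3 irreducible_poly)).foldl
    (fun (st : List Int × Int) _ =>
      let c := gf_multiply alpha st.2 irreducible_poly
      (st.1 ++ [c], c)) ([], 1)).1

-- ===== PORT B =====

-- MSB-first Horner field multiplication: `for i in reversed(range(b.bit_length()))`
def horner_pass (a b p : Int) (m : Nat) : Int :=
  ((List.range (PySem.Int.bitLength b)).reverse).foldl
    (fun (r : Int) (i : Nat) =>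
      let r1 := r <<< (1 : Nat)
      let r2 := if PySem.Int.band r1 ((1 : Int) <<< m) ≠ 0 then PySem.Int.bxor r1 p else r1
      if PySem.Int.band (b >>> i) 1 ≠ 0 then PySem.Int.bxor r2 a else r2) 0

def gf_mult_alt (a b poly : Int) : Int :=
  -- m = max(poly.bit_length() - 1, 0): Nat subtraction truncates at 0
  horner_pass a b poly (PySem.Int.bitLength poly - 1)

def find_conjugates_alt (alpha : Int) (irreducible_poly : Int) : List Int :=
  ((List.range (1 <<< (PySem.Int.bitLength irreducible_poly - 1))).foldl
    (fun (st : List Int × Int) _ =>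
      let c := gf_mult_alt alpha st.2 irreducible_poly
      (st.1 ++ [c], c)) ([], 1)).1

-- ===== PRECONDITION & SPEC =====
-- Pre_ excludes negative arguments: there gf_multiply's `while b` loop diverges as soon as an
-- intermediate product is negative, and Python's signed-bit accidents (len(bin(-p)) counts the
-- '-' sign) make the few values A does return on negative arguments artefacts of A's code.
def Pre_find_conjugates (alpha : Int) (irreducible_poly : Int) : Prop :=
  0 ≤ alpha ∧ 0 ≤ irreducible_poly
instance (alpha : Int) (irreducible_poly : Int) : Decidable (Pre_find_conjugates alpha irreducible_poly) := by
  unfold Pre_find_conjugates; infer_instance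

def pvWitness_find_conjugates : Int × Int := (2, 7)

def Spec_find_conjugates (alpha : Int) (irreducible_poly : Int) (out : List Int) : Prop := out = find_conjugates_alt alpha irreducible_poly
instance (alpha : Int) (irreducible_poly : Int) (out : List Int) : Decidable (Spec_find_conjugates alpha irreducible_poly out) := by unfold Spec_find_conjugates; infer_instance

-- ===== CLAIM (what is proved, stated in full; the proofs are below) =====
def Claim_equal_find_conjugates : Prop := ∀ (alpha : Int) (irreducible_poly : Int), Dom_find_conjugates alpha irreducible_poly → Pre_find_conjugates alpha irreducible_poly → Spec_find_conjugates alpha irreducible_poly (find_conjugates alpha irreducible_poly)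

-- ===== LEMMAS AND PROOFS =====

-- ---- Nat-level models of both ports (proof helpers; the ports above are the Int-faithful code) ----

def binLenSub3 (p : Nat) : Nat := if p = 0 then 0 else p.size - 1

def gf_multiply_loopN (a b p result : Nat) : Nat :=
  if hb : b = 0 then result
  else
    let result1 := if b &&& 1 ≠ 0 then result ^^^ a else result
    let a1 := a <<< 1
    let a2 := if a1 &&& (1 <<< binLenSub3 p) ≠ 0 then a1 ^^^ p else a1
    gf_multiply_loopN a2 (b >>> 1) p result1
termination_by b
decreasing_by
  rw [Nat.shiftRight_one]
  exact Nat.div_lt_self (Nat.pos_of_ne_zero hb) one_lt_two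

def horner_passN (a b p : Nat) (m : Nat) : Nat :=
  ((List.range b.size).reverse).foldl
    (fun r i =>
      let r1 := r <<< 1
      let r2 := if r1 &&& (1 <<< m) ≠ 0 then r1 ^^^ p else r1
      if (b >>> i) &&& 1 ≠ 0 then r2 ^^^ a else r2) 0

def gf_mult_altN (a b p : Nat) : Nat := horner_passN a b p (p.size - 1)

def find_conjugatesN (a p : Nat) : List Int :=
  ((List.range (1 <<< (p.size - 1))).foldl
    (fun (st : List Int × Nat) _ =>
      let c := gf_multiply_loopN a st.2 p 0
      (st.1 ++ [(c : Int)], c)) ([], 1)).1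

def find_conjugatesAltN (a p : Nat) : List Int :=
  ((List.range (1 <<< (p.size - 1))).foldl
    (fun (st : List Int × Nat) _ =>
      let c := gf_mult_altN a st.2 p
      (st.1 ++ [(c : Int)], c)) ([], 1)).1


-- A's per-iteration update of `a` (shift, then reduce when bit m = p.size - 1 is set)
def stepF (p r : Nat) : Nat :=
  let r1 := r <<< 1
  if r1 &&& (1 <<< (p.size - 1)) ≠ 0 then r1 ^^^ p else r1

theorem stepF_def (p r : Nat) :
    stepF p r = if (r <<< 1) &&& (1 <<< (p.size - 1)) ≠ 0 then (r <<< 1) ^^^ p else (r <<< 1) := rfl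

-- carryless (XOR) product, LSB-first binary recursion
def clm (a b : Nat) : Nat :=
  if hb : b = 0 then 0
  else (if b &&& 1 ≠ 0 then a else 0) ^^^ clm (a <<< 1) (b >>> 1)
termination_by b
decreasing_by
  rw [Nat.shiftRight_one]
  exact Nat.div_lt_self (Nat.pos_of_ne_zero hb) one_lt_two

-- field product with an interleaved per-bit step, LSB-first binary recursion
def polyF (p l b : Nat) : Nat :=
  if hb : b = 0 then 0
  else (if b &&& 1 ≠ 0 then l else 0) ^^^ polyF p (stepF p l) (b >>> 1)
termination_by b
decreasing_by
  rw [Nat.shiftRight_one]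
  exact Nat.div_lt_self (Nat.pos_of_ne_zero hb) one_lt_two

def stepN (p : Nat) : Nat → Nat → Nat
  | 0, l => l
  | n + 1, l => stepN p n (stepF p l)

theorem binLenSub3_eq (p : Nat) : binLenSub3 p = p.size - 1 := by
  unfold binLenSub3; split <;> simp_all [Nat.size_zero]

theorem nxor_left_comm (a b c : Nat) : a ^^^ (b ^^^ c) = b ^^^ (a ^^^ c) := by
  rw [← Nat.xor_assoc, Nat.xor_comm a b, Nat.xor_assoc]

theorem and_pow_ne_iff (x m : Nat) : (x &&& (1 <<< m) ≠ 0) ↔ x.testBit m = true := by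
  rw [Nat.one_shiftLeft, Nat.and_two_pow]
  cases h : x.testBit m
  · simp
  · simpa using (Nat.two_pow_pos m).ne'

theorem xor_shiftLeft (x y k : Nat) : (x ^^^ y) <<< k = (x <<< k) ^^^ (y <<< k) := by
  apply Nat.eq_of_testBit_eq; intro i
  simp [Nat.testBit_shiftLeft, Nat.testBit_xor, Bool.and_xor_distrib_left]

theorem testBit_shiftLeft_one_zero (x : Nat) : (x <<< 1).testBit 0 = false := by
  simp [Nat.testBit_shiftLeft]

theorem testBit_shiftLeft_one (x i : Nat) : (x <<< 1).testBit (i + 1) = x.testBit i := by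
  simp [Nat.testBit_shiftLeft]

theorem testBit_mask (x m i : Nat) :
    (x &&& ((1 <<< m) - 1)).testBit i = (x.testBit i && decide (i < m)) := by
  rw [Nat.one_shiftLeft]
  simp [Nat.testBit_and, Nat.testBit_two_pow_sub_one, Bool.and_comm]

theorem testBit_false_of_ge (p m i : Nat) (h : p < 2 ^ m) (him : m ≤ i) : p.testBit i = false :=
  Nat.testBit_lt_two_pow (lt_of_lt_of_le h (Nat.pow_le_pow_right (by norm_num) him))

theorem testBit_top (p : Nat) (hp : p ≠ 0) : p.testBit (p.size - 1) = true := by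
  have hsz : 0 < p.size := Nat.size_pos.mpr (Nat.pos_of_ne_zero hp)
  have h1 : 2 ^ (p.size - 1) ≤ p := Nat.lt_size.mp (by omega)
  have h2 : p < 2 ^ p.size := Nat.lt_size_self p
  have h3 : (2 : Nat) ^ p.size = 2 ^ (p.size - 1) * 2 := by
    rw [← pow_succ]
    congr 1
    omega
  rw [h3] at h2
  have hpos : 0 < 2 ^ (p.size - 1) := Nat.two_pow_pos _
  have hge : 1 ≤ p / 2 ^ (p.size - 1) := (Nat.le_div_iff_mul_le hpos).mpr (by omega)
  have hlt : p / 2 ^ (p.size - 1) < 2 := (Nat.div_lt_iff_lt_mul hpos).mpr (by omega)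
  have ht := Nat.toNat_testBit p (p.size - 1)
  have hq : p / 2 ^ (p.size - 1) = 1 := by omega
  rw [hq] at ht
  cases h : p.testBit (p.size - 1)
  · rw [h] at ht; simp at ht
  · rfl

theorem p_lt_pow (p : Nat) : p < 2 ^ (p.size - 1 + 1) := by
  rcases Nat.eq_zero_or_pos p with h | h
  · subst h; norm_num
  · have hsz : 0 < p.size := Nat.size_pos.mpr h
    have he : p.size - 1 + 1 = p.size := by omega
    rw [he]
    exact Nat.lt_size_self p

theorem step_zero (p : Nat) : stepF p 0 = 0 := by
  rw [stepF_def]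
  simp [Nat.zero_shiftLeft]

theorem step_hi (p a : Nat) : stepF p a >>> (p.size - 1) = (a >>> (p.size - 1)) <<< 1 := by
  rw [stepF_def]
  by_cases hf : (a <<< 1) &&& (1 <<< (p.size - 1)) ≠ 0
  · rw [if_pos hf]
    have hbit : (a <<< 1).testBit (p.size - 1) = true := (and_pow_ne_iff _ _).mp hf
    have hm1 : 1 ≤ p.size - 1 := by
      by_contra h
      have h0 : p.size - 1 = 0 := by omega
      rw [h0, testBit_shiftLeft_one_zero] at hbit
      exact Bool.false_ne_true hbit
    have hp0 : p ≠ 0 := by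
      intro h; subst h; simp [Nat.size_zero] at hm1
    have htop : p.testBit (p.size - 1) = true := testBit_top p hp0
    have hplt : p < 2 ^ (p.size - 1 + 1) := p_lt_pow p
    apply Nat.eq_of_testBit_eq
    intro i
    rw [Nat.testBit_shiftRight]
    cases i with
    | zero =>
      rw [Nat.add_zero, Nat.testBit_xor, hbit, htop, testBit_shiftLeft_one_zero]
      rfl
    | succ j =>
      have e : p.size - 1 + (j + 1) = (p.size - 1 + j) + 1 := by omega
      rw [e, Nat.testBit_xor, testBit_shiftLeft_one, testBit_shiftLeft_one,
        Nat.testBit_shiftRight,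
        testBit_false_of_ge p (p.size - 1 + 1) ((p.size - 1 + j) + 1) hplt (by omega),
        Bool.xor_false]
  · rw [if_neg hf]
    have hbit : (a <<< 1).testBit (p.size - 1) = false := by
      cases h : (a <<< 1).testBit (p.size - 1)
      · rfl
      · exact absurd ((and_pow_ne_iff _ _).mpr h) hf
    apply Nat.eq_of_testBit_eq
    intro i
    rw [Nat.testBit_shiftRight]
    cases i with
    | zero => rw [Nat.add_zero, hbit, testBit_shiftLeft_one_zero]
    | succ j =>
      have e : p.size - 1 + (j + 1) = (p.size - 1 + j) + 1 := by omega
      rw [e, testBit_shiftLeft_one, testBit_shiftLeft_one, Nat.testBit_shiftRight]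

theorem step_lo (p a : Nat) :
    stepF p a &&& ((1 <<< (p.size - 1)) - 1) = stepF p (a &&& ((1 <<< (p.size - 1)) - 1)) := by
  rcases Nat.eq_zero_or_pos (p.size - 1) with h0 | h0
  · rw [h0]
    simp [step_zero, Nat.shiftLeft_zero]
  · have hp0 : p ≠ 0 := by
      intro h; subst h; simp [Nat.size_zero] at h0
    have htop : p.testBit (p.size - 1) = true := testBit_top p hp0
    have hplt : p < 2 ^ (p.size - 1 + 1) := p_lt_pow p
    have hcondeq : ((a &&& ((1 <<< (p.size - 1)) - 1)) <<< 1).testBit (p.size - 1)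
        = (a <<< 1).testBit (p.size - 1) := by
      have e : p.size - 1 = (p.size - 1 - 1) + 1 := by omega
      rw [e, testBit_shiftLeft_one, testBit_shiftLeft_one, testBit_mask]
      have hh : (p.size - 1 - 1) < p.size - 1 := by omega
      simp [hh]
    rw [stepF_def, stepF_def]
    by_cases hf : (a <<< 1) &&& (1 <<< (p.size - 1)) ≠ 0
    · have hbit : (a <<< 1).testBit (p.size - 1) = true := (and_pow_ne_iff _ _).mp hf
      have hf2 : ((a &&& ((1 <<< (p.size - 1)) - 1)) <<< 1) &&& (1 <<< (p.size - 1)) ≠ 0 :=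
        (and_pow_ne_iff _ _).mpr (hcondeq.trans hbit)
      rw [if_pos hf, if_pos hf2]
      apply Nat.eq_of_testBit_eq
      intro i
      cases i with
      | zero =>
        rw [testBit_mask, Nat.testBit_xor, Nat.testBit_xor, testBit_shiftLeft_one_zero,
          testBit_shiftLeft_one_zero]
        simp [h0]
      | succ j =>
        rw [testBit_mask, Nat.testBit_xor, Nat.testBit_xor, testBit_shiftLeft_one,
          testBit_shiftLeft_one, testBit_mask]
        by_cases hj : j + 1 < p.size - 1
        · have hj' : j < p.size - 1 := by omega
          simp [hj, hj']
        · by_cases hje : j + 1 = p.size - 1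
          · have hj' : j < p.size - 1 := by omega
            have haj : a.testBit j = true := by
              have hb2 := hbit
              rw [← hje, testBit_shiftLeft_one] at hb2
              exact hb2
            have htj : p.testBit (j + 1) = true := by rw [hje]; exact htop
            simp [hj, hj', haj, htj]
          · have hpj : p.testBit (j + 1) = false :=
              testBit_false_of_ge p (p.size - 1 + 1) (j + 1) hplt (by omega)
            have hj' : ¬ j < p.size - 1 := by omega
            simp [hj, hj', hpj]
    · have hbit : (a <<< 1).testBit (p.size - 1) = false := by
        cases h : (a <<< 1).testBit (p.size - 1)
        · rfl
        · exact absurd ((and_pow_ne_iff _ _).mpr h) hf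
      have hf2 : ¬ (((a &&& ((1 <<< (p.size - 1)) - 1)) <<< 1) &&& (1 <<< (p.size - 1)) ≠ 0) := by
        intro h
        have hh := (and_pow_ne_iff _ _).mp h
        rw [hcondeq, hbit] at hh
        exact Bool.false_ne_true hh
      rw [if_neg hf, if_neg hf2]
      apply Nat.eq_of_testBit_eq
      intro i
      cases i with
      | zero =>
        rw [testBit_mask, testBit_shiftLeft_one_zero, testBit_shiftLeft_one_zero]
        simp
      | succ j =>
        rw [testBit_mask, testBit_shiftLeft_one, testBit_shiftLeft_one, testBit_mask]
        by_cases hj : j + 1 < p.size - 1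
        · simp [hj, show j < p.size - 1 by omega]
        · by_cases hje : j + 1 = p.size - 1
          · have haj : a.testBit j = false := by
              have hb2 := hbit
              rw [← hje, testBit_shiftLeft_one] at hb2
              exact hb2
            simp [hj, haj]
          · simp [hj, show ¬ j < p.size - 1 by omega]

theorem hi_lo (m a : Nat) : ((a >>> m) <<< m) ^^^ (a &&& ((1 <<< m) - 1)) = a := by
  apply Nat.eq_of_testBit_eq
  intro i
  rw [Nat.testBit_xor, Nat.testBit_shiftLeft, testBit_mask]
  by_cases him : m ≤ i
  · rw [Nat.testBit_shiftRight]
    have e : m + (i - m) = i := by omega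
    rw [e]
    simp [him, show ¬ i < m by omega]
  · simp [him, show i < m by omega]

theorem step_xor (p x y : Nat) : stepF p (x ^^^ y) = stepF p x ^^^ stepF p y := by
  have hnot : ∀ z : Nat, z.testBit (p.size - 1) = false → ¬ (z &&& (1 <<< (p.size - 1)) ≠ 0) := by
    intro z hz hcon
    rw [(and_pow_ne_iff _ _).mp hcon] at hz
    exact Bool.noConfusion hz
  rw [stepF_def, stepF_def, stepF_def, xor_shiftLeft]
  by_cases h1 : (x <<< 1).testBit (p.size - 1) = true <;>
    by_cases h2 : (y <<< 1).testBit (p.size - 1) = true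
  · rw [if_pos ((and_pow_ne_iff _ _).mpr h1), if_pos ((and_pow_ne_iff _ _).mpr h2),
      if_neg (hnot _ (by rw [Nat.testBit_xor, h1, h2]; rfl))]
    simp [Nat.xor_assoc, nxor_left_comm, Nat.xor_comm]
  · rw [Bool.not_eq_true] at h2
    rw [if_pos ((and_pow_ne_iff _ _).mpr h1), if_neg (hnot _ h2),
      if_pos ((and_pow_ne_iff _ _).mpr (by rw [Nat.testBit_xor, h1, h2]; rfl))]
    simp [Nat.xor_assoc, nxor_left_comm, Nat.xor_comm]
  · rw [Bool.not_eq_true] at h1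
    rw [if_neg (hnot _ h1), if_pos ((and_pow_ne_iff _ _).mpr h2),
      if_pos ((and_pow_ne_iff _ _).mpr (by rw [Nat.testBit_xor, h1, h2]; rfl))]
    simp [Nat.xor_assoc, nxor_left_comm, Nat.xor_comm]
  · rw [Bool.not_eq_true] at h1 h2
    rw [if_neg (hnot _ h1), if_neg (hnot _ h2),
      if_neg (hnot _ (by rw [Nat.testBit_xor, h1, h2]; rfl))]

theorem stepN_zero (p n : Nat) : stepN p n 0 = 0 := by
  induction n with
  | zero => rfl
  | succ n ih => simp [stepN, step_zero, ih]

theorem stepN_xor (p n : Nat) : ∀ x y, stepN p n (x ^^^ y) = stepN p n x ^^^ stepN p n y := by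
  induction n with
  | zero => intro x y; rfl
  | succ n ih => intro x y; simp [stepN, step_xor, ih]

-- recombination of the two split halves, used in the odd case of gf_loop_split
theorem split_recombine (m a x y : Nat) :
    a ^^^ (x ^^^ y) = (((a >>> m) <<< m) ^^^ x) ^^^ ((a &&& ((1 <<< m) - 1)) ^^^ y) := by
  conv_lhs => rw [← hi_lo m a]
  simp [Nat.xor_assoc, nxor_left_comm, Nat.xor_comm]

theorem clm_zero (a : Nat) : clm a 0 = 0 := by rw [clm]; simp

theorem clm_unfold (a b : Nat) :
    clm a b = (if b &&& 1 ≠ 0 then a else 0) ^^^ clm (a <<< 1) (b >>> 1) := by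
  by_cases hb : b = 0
  · subst hb; simp [clm_zero]
  · rw [clm]; simp [hb]

theorem polyF_zero (p l : Nat) : polyF p l 0 = 0 := by rw [polyF]; simp

theorem polyF_unfold (p l b : Nat) :
    polyF p l b = (if b &&& 1 ≠ 0 then l else 0) ^^^ polyF p (stepF p l) (b >>> 1) := by
  by_cases hb : b = 0
  · subst hb; simp [polyF_zero]
  · rw [polyF]; simp [hb]

theorem gf_zero (a p r : Nat) : gf_multiply_loopN a 0 p r = r := by
  rw [gf_multiply_loopN]; simp

theorem gf_unfold (a b p r : Nat) (hb : b ≠ 0) :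
    gf_multiply_loopN a b p r =
      gf_multiply_loopN (stepF p a) (b >>> 1) p (if b &&& 1 ≠ 0 then r ^^^ a else r) := by
  rw [gf_multiply_loopN]
  simp only [dif_neg hb, binLenSub3_eq]
  rfl

theorem shiftRight_lt (b : Nat) (hb : b ≠ 0) : b >>> 1 < b := by
  rw [Nat.shiftRight_one]
  exact Nat.div_lt_self (Nat.pos_of_ne_zero hb) one_lt_two

theorem gf_loop_acc (b : Nat) : ∀ a p r, gf_multiply_loopN a b p r = r ^^^ gf_multiply_loopN a b p 0 := by
  induction b using Nat.strong_induction_on with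
  | _ b ih =>
    intro a p r
    by_cases hb : b = 0
    · subst hb
      rw [gf_zero, gf_zero]
      exact (Nat.xor_zero r).symm
    · conv_lhs => rw [gf_unfold a b p r hb, ih _ (shiftRight_lt b hb)]
      conv_rhs => rw [gf_unfold a b p 0 hb, ih _ (shiftRight_lt b hb)]
      by_cases ho : b &&& 1 ≠ 0
      · rw [if_pos ho, if_pos ho, Nat.zero_xor, Nat.xor_assoc]
      · rw [if_neg ho, if_neg ho, Nat.zero_xor]

theorem gf_loop_split (b : Nat) : ∀ a p, gf_multiply_loopN a b p 0 =
    (clm (a >>> (p.size - 1)) b <<< (p.size - 1)) ^^^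
      polyF p (a &&& ((1 <<< (p.size - 1)) - 1)) b := by
  induction b using Nat.strong_induction_on with
  | _ b ih =>
    intro a p
    by_cases hb : b = 0
    · subst hb
      rw [gf_zero, clm_zero, polyF_zero, Nat.zero_shiftLeft, Nat.zero_xor]
    · conv_lhs => rw [gf_unfold a b p 0 hb, gf_loop_acc, ih _ (shiftRight_lt b hb),
        step_hi, step_lo]
      conv_rhs => rw [clm_unfold, polyF_unfold]
      rw [xor_shiftLeft]
      by_cases ho : b &&& 1 ≠ 0
      · rw [if_pos ho, if_pos ho, if_pos ho, Nat.zero_xor]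
        exact split_recombine (p.size - 1) a _ _
      · rw [if_neg ho, if_neg ho, if_neg ho]
        simp only [Nat.zero_xor, Nat.zero_shiftLeft]

-- polyF is linear in its multiplicand argument
theorem polyF_xor_left (b : Nat) : ∀ p x y, polyF p (x ^^^ y) b = polyF p x b ^^^ polyF p y b := by
  induction b using Nat.strong_induction_on with
  | _ b ih =>
    intro p x y
    by_cases hb : b = 0
    · subst hb; simp [polyF_zero]
    · rw [polyF_unfold p (x ^^^ y) b, polyF_unfold p x b, polyF_unfold p y b, step_xor,
        ih _ (shiftRight_lt b hb)]
      by_cases ho : b &&& 1 ≠ 0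
      · rw [if_pos ho, if_pos ho, if_pos ho]
        simp [Nat.xor_assoc, nxor_left_comm, Nat.xor_comm]
      · rw [if_neg ho, if_neg ho, if_neg ho]
        simp [Nat.xor_assoc, nxor_left_comm, Nat.xor_comm]

-- bits at or above the top-bit position m+1 pass through stepF as a plain shift
theorem step_high (p hi k : Nat) (hk : p.size - 1 ≤ k) :
    stepF p (hi <<< k) = hi <<< (k + 1) := by
  rw [stepF_def, ← Nat.shiftLeft_add hi k 1]
  have hcond : ¬ ((hi <<< (k + 1)) &&& (1 <<< (p.size - 1)) ≠ 0) := by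
    intro h
    have hbit := (and_pow_ne_iff _ _).mp h
    rw [Nat.testBit_shiftLeft] at hbit
    have : decide (k + 1 ≤ p.size - 1) = false := by
      simp only [decide_eq_false_iff_not]
      omega
    rw [this, Bool.false_and] at hbit
    exact Bool.false_ne_true hbit
  rw [if_neg hcond]

-- on an operand shifted up to the field boundary polyF is the plain carryless product
theorem polyF_high (b : Nat) : ∀ p hi k, p.size - 1 ≤ k →
    polyF p (hi <<< k) b = (clm hi b) <<< k := by
  induction b using Nat.strong_induction_on with
  | _ b ih =>
    intro p hi k hk
    by_cases hb : b = 0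
    · subst hb; rw [polyF_zero, clm_zero, Nat.zero_shiftLeft]
    · rw [polyF_unfold, clm_unfold, xor_shiftLeft, step_high p hi k hk,
        show hi <<< (k + 1) = (hi <<< 1) <<< k by
          rw [Nat.add_comm k 1, Nat.shiftLeft_add],
        ih _ (shiftRight_lt b hb) p (hi <<< 1) k hk]
      by_cases ho : b &&& 1 ≠ 0
      · rw [if_pos ho, if_pos ho]
      · rw [if_neg ho, if_neg ho, Nat.zero_shiftLeft]

-- full-operand polyF splits into the unreduced high carryless part and the in-field part,
-- which by gf_loop_split is exactly A's loop
theorem polyF_split (p a b : Nat) :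
    polyF p a b = (clm (a >>> (p.size - 1)) b <<< (p.size - 1)) ^^^
      polyF p (a &&& ((1 <<< (p.size - 1)) - 1)) b := by
  conv_lhs => rw [← hi_lo (p.size - 1) a]
  rw [polyF_xor_left, polyF_high b p (a >>> (p.size - 1)) (p.size - 1) le_rfl]

theorem polyF_add_pow (n : Nat) : ∀ p l x, x < 2 ^ n →
    polyF p l (x + 2 ^ n) = polyF p l x ^^^ stepN p n l := by
  induction n with
  | zero =>
    intro p l x hx
    rw [pow_zero] at hx ⊢
    have hx0 : x = 0 := by omega
    subst hx0
    rw [Nat.zero_add, polyF_unfold p l 1, polyF_zero, Nat.zero_xor]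
    have h10 : (1 : Nat) >>> 1 = 0 := by decide
    have h11 : (1 : Nat) &&& 1 ≠ 0 := by decide
    rw [h10, polyF_zero, if_pos h11, Nat.xor_zero]
    rfl
  | succ n ih =>
    intro p l x hx
    have h2 : (2 : Nat) ^ (n + 1) = 2 * 2 ^ n := by ring
    have hodd : (x + 2 ^ (n + 1)) &&& 1 = x &&& 1 := by
      rw [Nat.and_one_is_mod, Nat.and_one_is_mod]
      omega
    have hshift : (x + 2 ^ (n + 1)) >>> 1 = x >>> 1 + 2 ^ n := by
      rw [Nat.shiftRight_one, Nat.shiftRight_one]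
      omega
    have hlt : x >>> 1 < 2 ^ n := by
      rw [Nat.shiftRight_one]
      omega
    rw [polyF_unfold p l (x + 2 ^ (n + 1)), hodd, hshift, ih p (stepF p l) _ hlt,
      polyF_unfold p l x,
      show stepN p (n + 1) l = stepN p n (stepF p l) from rfl, Nat.xor_assoc]

theorem horner_aux (p l b : Nat) : ∀ n r,
    ((List.range n).reverse).foldl
      (fun r i =>
        let r1 := r <<< 1
        let r2 := if r1 &&& (1 <<< (p.size - 1)) ≠ 0 then r1 ^^^ p else r1
        if (b >>> i) &&& 1 ≠ 0 then r2 ^^^ l else r2) r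
      = stepN p n r ^^^ polyF p l (b % 2 ^ n) := by
  intro n
  induction n with
  | zero =>
    intro r
    simp [stepN, polyF_zero, Nat.mod_one]
  | succ n ih =>
    intro r
    rw [List.range_succ, List.reverse_append]
    simp only [List.reverse_cons, List.reverse_nil, List.nil_append, List.singleton_append,
      List.foldl_cons]
    rw [ih]
    show stepN p n (if (b >>> n) &&& 1 ≠ 0 then stepF p r ^^^ l else stepF p r) ^^^
        polyF p l (b % 2 ^ n)
      = stepN p (n + 1) r ^^^ polyF p l (b % 2 ^ (n + 1))
    have hbit : (b >>> n) &&& 1 = b / 2 ^ n % 2 := by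
      rw [Nat.and_one_is_mod, Nat.shiftRight_eq_div_pow]
    have hmod : b % 2 ^ (n + 1) = b % 2 ^ n + 2 ^ n * (b / 2 ^ n % 2) := Nat.mod_pow_succ
    by_cases ho : (b >>> n) &&& 1 ≠ 0
    · rw [if_pos ho]
      have h1 : b / 2 ^ n % 2 = 1 := by omega
      have hmod1 : b % 2 ^ (n + 1) = b % 2 ^ n + 2 ^ n := by
        rw [h1, Nat.mul_one] at hmod
        exact hmod
      rw [hmod1, polyF_add_pow n p l (b % 2 ^ n) (Nat.mod_lt b (Nat.two_pow_pos n)),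
        stepN_xor, show stepN p (n + 1) r = stepN p n (stepF p r) from rfl]
      simp [Nat.xor_assoc, nxor_left_comm, Nat.xor_comm]
    · rw [if_neg ho]
      have h1 : b / 2 ^ n % 2 = 0 := by omega
      have hmod1 : b % 2 ^ (n + 1) = b % 2 ^ n := by
        rw [h1, Nat.mul_zero, Nat.add_zero] at hmod
        exact hmod
      rw [hmod1]
      rfl

theorem horner_pass_eq (l b p : Nat) : horner_passN l b p (p.size - 1) = polyF p l b := by
  unfold horner_passN
  rw [horner_aux p l b b.size 0, stepN_zero, Nat.zero_xor,
    Nat.mod_eq_of_lt (Nat.lt_size_self b)]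

theorem gf_inner (a b p : Nat) : gf_multiply_loopN a b p 0 = gf_mult_altN a b p := by
  unfold gf_mult_altN
  rw [horner_pass_eq, polyF_split, gf_loop_split]


-- ---- cast bridges: on nonnegative inputs the Int ports compute the Nat models ----

theorem natCast_shiftLeft' (m k : Nat) : ((m : Int) <<< k) = ((m <<< k : Nat) : Int) := by
  rw [← Int.shiftLeft_natCast_right, Int.shiftLeft_natCast]

theorem natCast_shiftRight' (m k : Nat) : ((m : Int) >>> k) = ((m >>> k : Nat) : Int) := by
  rw [← Int.shiftRight_natCast_right, Int.shiftRight_natCast]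

theorem size_div2_succ (n : Nat) (hn : n ≠ 0) : n.size = (n / 2).size + 1 := by
  apply le_antisymm
  · rw [Nat.size_le, pow_succ]
    have h := Nat.lt_size_self (n / 2)
    omega
  · have h1 : 2 ^ (n / 2).size ≤ n := by
      rcases Nat.eq_zero_or_pos (n / 2) with h0 | h0
      · rw [h0, Nat.size_zero, pow_zero]
        omega
      · have hsz : 0 < (n / 2).size := Nat.size_pos.mpr h0
        have h2 : 2 ^ ((n / 2).size - 1) ≤ n / 2 := Nat.lt_size.mp (by omega)
        have h3 : (2 : Nat) ^ (n / 2).size = 2 ^ ((n / 2).size - 1) * 2 := by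
          rw [← pow_succ]
          congr 1
          omega
        omega
    have h4 := Nat.lt_size.mpr h1
    omega

theorem bitLength_cast (p : Nat) : PySem.Int.bitLength (p : Int) = p.size := by
  induction p using Nat.strong_induction_on with
  | _ p ih =>
    rcases Nat.eq_zero_or_pos p with h | h
    · subst h
      simpa using PySem.Int.bitLength_zero
    · rw [PySem.Int.bitLength_natCast h, ih (p / 2) (by omega), ← size_div2_succ p (by omega)]

theorem pyBinLenSub3_cast (p : Nat) : pyBinLenSub3 (p : Int) = p.size - 1 := by
  unfold pyBinLenSub3
  rcases Nat.eq_zero_or_pos p with h | h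
  · subst h
    simp [Nat.size_zero]
  · have h0 : ((p : Int) ≠ 0) := Int.natCast_ne_zero.mpr (by omega)
    have h1 : (0 : Int) < p := by exact_mod_cast h
    rw [if_neg h0, if_pos h1, bitLength_cast]

theorem band1_cast (z : Nat) : PySem.Int.band (z : Int) 1 = ((z &&& 1 : Nat) : Int) := by
  exact_mod_cast PySem.Int.band_natCast z 1

theorem mask_cast (k : Nat) : ((1 : Int) <<< k) = (((1 <<< k : Nat)) : Int) := by
  exact_mod_cast natCast_shiftLeft' 1 k

theorem gf_bridge : ∀ fuel (a b p r : Nat), b < 2 ^ fuel →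
    gf_multiply_loop fuel (a : Int) (b : Int) (p : Int) (r : Int)
      = ((gf_multiply_loopN a b p r : Nat) : Int) := by
  intro fuel
  induction fuel with
  | zero =>
    intro a b p r hb
    rw [pow_zero] at hb
    have hb0 : b = 0 := by omega
    subst hb0
    rw [gf_zero]
    rfl
  | succ fuel ih =>
    intro a b p r hb
    by_cases hb0 : b = 0
    · subst hb0
      rw [gf_zero]
      simp [gf_multiply_loop]
    · have hbI : ((b : Int) ≠ 0) := Int.natCast_ne_zero.mpr hb0
      have hstep : b >>> 1 < 2 ^ fuel := by
        rw [Nat.shiftRight_one]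
        have h2 : (2 : Nat) ^ (fuel + 1) = 2 * 2 ^ fuel := by ring
        omega
      show (if (b : Int) = 0 then (r : Int) else
          gf_multiply_loop fuel
            (if PySem.Int.band ((a : Int) <<< (1 : Nat)) ((1 : Int) <<< pyBinLenSub3 (p : Int)) ≠ 0
              then PySem.Int.bxor ((a : Int) <<< (1 : Nat)) (p : Int) else ((a : Int) <<< (1 : Nat)))
            ((b : Int) >>> (1 : Nat)) (p : Int)
            (if PySem.Int.band (b : Int) 1 ≠ 0 then PySem.Int.bxor (r : Int) (a : Int) else (r : Int)))
        = ((gf_multiply_loopN a b p r : Nat) : Int)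
      rw [if_neg hbI, pyBinLenSub3_cast, band1_cast, natCast_shiftLeft', mask_cast,
        natCast_shiftRight', PySem.Int.band_natCast, PySem.Int.bxor_natCast, PySem.Int.bxor_natCast,
        gf_unfold a b p r hb0, stepF_def]
      simp only [Int.natCast_ne_zero, ← apply_ite (fun n : Nat => (n : Int))]
      exact ih _ _ _ _ hstep

theorem horner_foldl_cast (lo b p : Nat) (m : Nat) : ∀ (l : List Nat) (r : Nat),
    l.foldl (fun (r : Int) (i : Nat) =>
        let r1 := r <<< (1 : Nat)
        let r2 := if PySem.Int.band r1 ((1 : Int) <<< m) ≠ 0 then PySem.Int.bxor r1 (p : Int) else r1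
        if PySem.Int.band ((b : Int) >>> i) 1 ≠ 0 then PySem.Int.bxor r2 (lo : Int) else r2)
      (r : Int)
      = ((l.foldl (fun r i =>
          let r1 := r <<< 1
          let r2 := if r1 &&& (1 <<< m) ≠ 0 then r1 ^^^ p else r1
          if (b >>> i) &&& 1 ≠ 0 then r2 ^^^ lo else r2) r : Nat) : Int) := by
  intro l
  induction l with
  | nil => intro r; rfl
  | cons x xs ih =>
    intro r
    rw [List.foldl_cons, List.foldl_cons]
    show xs.foldl _
        (if PySem.Int.band ((b : Int) >>> x) 1 ≠ 0
          then PySem.Int.bxor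
            (if PySem.Int.band ((r : Int) <<< (1 : Nat)) ((1 : Int) <<< m) ≠ 0
              then PySem.Int.bxor ((r : Int) <<< (1 : Nat)) (p : Int) else ((r : Int) <<< (1 : Nat)))
            (lo : Int)
          else (if PySem.Int.band ((r : Int) <<< (1 : Nat)) ((1 : Int) <<< m) ≠ 0
              then PySem.Int.bxor ((r : Int) <<< (1 : Nat)) (p : Int) else ((r : Int) <<< (1 : Nat)))) = _
    rw [natCast_shiftRight', band1_cast, natCast_shiftLeft', mask_cast, PySem.Int.band_natCast,
      PySem.Int.bxor_natCast]
    simp only [Int.natCast_ne_zero, ← apply_ite (fun n : Nat => (n : Int)), PySem.Int.bxor_natCast]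
    exact ih _

theorem horner_bridge (lo b p : Nat) (m : Nat) :
    horner_pass (lo : Int) (b : Int) (p : Int) m = ((horner_passN lo b p m : Nat) : Int) := by
  unfold horner_pass horner_passN
  rw [bitLength_cast]
  simpa using horner_foldl_cast lo b p m ((List.range b.size).reverse) 0

theorem gf_mult_alt_bridge (a b p : Nat) :
    gf_mult_alt (a : Int) (b : Int) (p : Int) = ((gf_mult_altN a b p : Nat) : Int) := by
  unfold gf_mult_alt gf_mult_altN
  rw [bitLength_cast, horner_bridge]

theorem gf_multiply_cast (a c p : Nat) :
    gf_multiply (a : Int) (c : Int) (p : Int) = ((gf_multiply_loopN a c p 0 : Nat) : Int) := by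
  unfold gf_multiply
  rw [bitLength_cast]
  have hc : c < 2 ^ (c.size + 1) := by
    have h1 := Nat.lt_size_self c
    have h2 : (2 : Nat) ^ (c.size + 1) = 2 * 2 ^ c.size := by ring
    omega
  exact_mod_cast gf_bridge (c.size + 1) a c p 0 hc

theorem outerA_cast (a p : Nat) : ∀ (l : List Nat) (acc : List Int) (c : Nat),
    (l.foldl (fun (st : List Int × Int) _ =>
        (st.1 ++ [gf_multiply (a : Int) st.2 (p : Int)], gf_multiply (a : Int) st.2 (p : Int)))
      (acc, (c : Int))).1
    = (l.foldl (fun (st : List Int × Nat) _ =>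
        (st.1 ++ [((gf_multiply_loopN a st.2 p 0 : Nat) : Int)], gf_multiply_loopN a st.2 p 0))
      (acc, c)).1 := by
  intro l
  induction l with
  | nil => intro acc c; rfl
  | cons x xs ih =>
    intro acc c
    rw [List.foldl_cons, List.foldl_cons, gf_multiply_cast]
    exact ih _ _

theorem outerB_cast (a p : Nat) : ∀ (l : List Nat) (acc : List Int) (c : Nat),
    (l.foldl (fun (st : List Int × Int) _ =>
        (st.1 ++ [gf_mult_alt (a : Int) st.2 (p : Int)], gf_mult_alt (a : Int) st.2 (p : Int)))
      (acc, (c : Int))).1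
    = (l.foldl (fun (st : List Int × Nat) _ =>
        (st.1 ++ [((gf_mult_altN a st.2 p : Nat) : Int)], gf_mult_altN a st.2 p))
      (acc, c)).1 := by
  intro l
  induction l with
  | nil => intro acc c; rfl
  | cons x xs ih =>
    intro acc c
    rw [List.foldl_cons, List.foldl_cons, gf_mult_alt_bridge]
    exact ih _ _

theorem findA_bridge (a p : Nat) : find_conjugates (a : Int) (p : Int) = find_conjugatesN a p := by
  unfold find_conjugates find_conjugatesN
  rw [pyBinLenSub3_cast]
  exact_mod_cast outerA_cast a p (List.range (1 <<< (p.size - 1))) [] 1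

theorem findB_bridge (a p : Nat) : find_conjugates_alt (a : Int) (p : Int) = find_conjugatesAltN a p := by
  unfold find_conjugates_alt find_conjugatesAltN
  rw [bitLength_cast]
  exact_mod_cast outerB_cast a p (List.range (1 <<< (p.size - 1))) [] 1

theorem findN_eq (a p : Nat) : find_conjugatesN a p = find_conjugatesAltN a p := by
  unfold find_conjugatesN find_conjugatesAltN
  simp only [gf_inner]

-- ===== VERDICT (by name: the statement is the Claim_ definition above) =====
theorem find_conjugates_spec : Claim_equal_find_conjugates := by
  unfold Claim_equal_find_conjugates
  intro alpha irreducible_poly _ hpre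
  obtain ⟨h1, h2⟩ := hpre
  unfold Spec_find_conjugates
  rw [← Int.toNat_of_nonneg h1, ← Int.toNat_of_nonneg h2, findA_bridge, findB_bridge, findN_eq]
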